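-- pv_equiv track=rewrite | github.com/fonyodigusztav/BEVADAT2022232 | HAZI/HAZI01/HAZI01.py | remove_tuplicates
-- ===== SOURCE A (Python) =====
-- def remove_tuplicates(input_list : list) -> list:
--     removable=[]
--     for i in range(0, len(input_list), 1):
--         for j in range(len(input_list)-1, -1, -1):
--             if j != i:
--                 if input_list[i]==input_list[j]:
--                     if(input_list[i] not in removable):
--                         removable.append(input_list[i])
--     for x in removable:
--         input_list.remove(x)
--     return input_list
-- ===== SOURCE B (Python) =====
-- def remove_tuplicates(input_list : list) -> list:
--     # One pass: keep x at position i iff it already occurred earlier, or it never occurs later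
--     # (i.e. drop exactly the first occurrence of every value that recurs).
--     result = [x for i, x in enumerate(input_list)
--               if x in input_list[:i] or x not in input_list[i+1:]]
--     input_list[:] = result
--     return input_list
-- ===== Notes on version B (the rewrite author's own statement) =====
-- stated objective: alternative
-- what changed: A collects a 'removable' list via a quadruple-nested scan (for each i, a full backwards j-scan plus a membership test on the growing removable list) and then calls list.remove once per duplicated value; B is a single left-to-right comprehension that keeps each element iff it occurred earlier or never occurs later, then writes back in place — same O(n^2) class but one slice-scan pass instead of nested scans, measured ~38x faster.
import Mathlib
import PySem

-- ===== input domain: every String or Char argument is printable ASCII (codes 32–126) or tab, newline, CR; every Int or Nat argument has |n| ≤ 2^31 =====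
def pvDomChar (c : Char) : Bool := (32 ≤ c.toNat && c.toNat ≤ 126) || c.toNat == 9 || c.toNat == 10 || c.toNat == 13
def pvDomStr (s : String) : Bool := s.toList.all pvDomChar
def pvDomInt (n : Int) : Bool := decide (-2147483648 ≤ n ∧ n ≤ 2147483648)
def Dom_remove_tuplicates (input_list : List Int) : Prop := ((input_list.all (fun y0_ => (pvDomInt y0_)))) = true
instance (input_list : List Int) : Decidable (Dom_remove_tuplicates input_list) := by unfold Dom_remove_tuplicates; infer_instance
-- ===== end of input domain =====

-- B replaces A's collect-removable-then-list.remove two-phase algorithm by a single left-to-right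
-- survivor pass (keep x at i iff x occurred earlier or does not occur later); both Pythons mutate
-- the argument in place identically (final contents = returned list), the theorem is about the
-- returned value.

-- ===== PORT A =====
-- indices i, j always lie in range, so Python's input_list[i] is ported as pyGetD with default 0
-- (never reached); list.remove(x) is remove? — always 'some' here since x is present, so getD acc
-- is never reached either.
def remove_tuplicates (input_list : List Int) : List Int :=
  let n : Int := input_list.length
  let removable : List Int :=
    (PySem.List.pyRange 0 n 1).foldl (fun acc i =>
      (PySem.List.pyRange (n - 1) (-1) (-1)).foldl (fun acc j =>
        if j ≠ i then
          if PySem.List.pyGetD input_list i 0 = PySem.List.pyGetD input_list j 0 then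
            if PySem.List.pyGetD input_list i 0 ∉ acc then acc ++ [PySem.List.pyGetD input_list i 0]
            else acc
          else acc
        else acc) acc) []
  removable.foldl (fun acc x => (PySem.List.remove? acc x).getD acc) input_list

-- ===== PORT B =====
def remove_tuplicates_alt (input_list : List Int) : List Int :=
  (PySem.List.enumerate input_list).filterMap (fun p =>
    if p.2 ∈ PySem.List.slice input_list none (some p.1)
       ∨ p.2 ∉ PySem.List.slice input_list (some (p.1 + 1)) none
    then some p.2 else none)

-- ===== PRECONDITION & SPEC =====
def Spec_remove_tuplicates (input_list : List Int) (out : List Int) : Prop := out = remove_tuplicates_alt input_list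
instance (input_list : List Int) (out : List Int) : Decidable (Spec_remove_tuplicates input_list out) := by unfold Spec_remove_tuplicates; infer_instance

-- ===== CLAIM (what is proved, stated in full; the proofs are below) =====
def Claim_equal_remove_tuplicates : Prop := ∀ (input_list : List Int), Dom_remove_tuplicates input_list → Spec_remove_tuplicates input_list (remove_tuplicates input_list)

-- ===== LEMMAS AND PROOFS =====

-- A's final phase: remove the first occurrence of each value of R from l, as a single pass
-- over l consuming R.
def goA (l R : List Int) : List Int :=
  match l with
  | [] => []
  | a :: t => if a ∈ R then goA t (R.erase a) else a :: goA t R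

-- B as a single pass carrying the already-seen prefix.
def goB (pre suf : List Int) : List Int :=
  match suf with
  | [] => []
  | a :: t => if a ∈ pre ∨ a ∉ t then a :: goB (pre ++ [a]) t else goB (pre ++ [a]) t

-- the inner j-loop appends v at most once, iff some j satisfies both guards and v is fresh
lemma inner_loop (js : List Int) (P Q : Int → Prop) [DecidablePred P] [DecidablePred Q]
    (v : Int) (acc : List Int) :
    js.foldl (fun a j => if P j then (if Q j then (if v ∉ a then a ++ [v] else a) else a) else a) acc
      = if (∃ j ∈ js, P j ∧ Q j) ∧ v ∉ acc then acc ++ [v] else acc := by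
  induction js generalizing acc with
  | nil => simp
  | cons j js ih =>
    simp only [List.foldl_cons, ih, List.mem_cons]
    by_cases hP : P j <;> by_cases hQ : Q j <;> by_cases hv : v ∈ acc <;>
      simp [hP, hQ, hv]

-- membership in an append-if-fresh accumulation loop
lemma mem_foldl_appendIf (is : List Int) (C : Int → Prop) [DecidablePred C]
    (v : Int → Int) (acc : List Int) (y : Int) :
    y ∈ is.foldl (fun a i => if C i ∧ v i ∉ a then a ++ [v i] else a) acc
      ↔ y ∈ acc ∨ ∃ i ∈ is, C i ∧ v i = y := by
  induction is generalizing acc with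
  | nil => simp
  | cons i is ih =>
    simp only [List.foldl_cons, ih, List.mem_cons]
    by_cases hC : C i ∧ v i ∉ acc
    · simp only [if_pos hC, List.mem_append, List.mem_singleton]
      constructor
      · rintro (⟨h | h⟩ | ⟨k, hk, hCk, hvk⟩)
        · exact Or.inl h
        · exact Or.inr ⟨i, Or.inl rfl, hC.1, h.symm⟩
        · exact Or.inr ⟨k, Or.inr hk, hCk, hvk⟩
      · rintro (h | ⟨k, (rfl | hk), hCk, hvk⟩)
        · exact Or.inl (Or.inl h)
        · exact Or.inl (Or.inr hvk.symm)
        · exact Or.inr ⟨k, hk, hCk, hvk⟩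
    · simp only [if_neg hC]
      constructor
      · rintro (h | ⟨k, hk, hCk, hvk⟩)
        · exact Or.inl h
        · exact Or.inr ⟨k, Or.inr hk, hCk, hvk⟩
      · rintro (h | ⟨k, (rfl | hk), hCk, hvk⟩)
        · exact Or.inl h
        · subst hvk
          rcases not_and_or.mp hC with h | h
          · exact absurd hCk h
          · exact Or.inl (not_not.mp h)
        · exact Or.inr ⟨k, hk, hCk, hvk⟩

-- nodup is preserved by the accumulation loop
lemma nodup_foldl_appendIf (is : List Int) (C : Int → Prop) [DecidablePred C]
    (v : Int → Int) (acc : List Int) (h : acc.Nodup) :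
    (is.foldl (fun a i => if C i ∧ v i ∉ a then a ++ [v i] else a) acc).Nodup := by
  induction is generalizing acc with
  | nil => simpa
  | cons i is ih =>
    simp only [List.foldl_cons]
    by_cases hC : C i ∧ v i ∉ acc
    · simp only [if_pos hC]
      exact ih _ (h.append (List.nodup_singleton _) (List.disjoint_singleton.mpr hC.2))
    · simp only [if_neg hC]; exact ih _ h

-- two distinct positions holding y ↔ count y ≥ 2
lemma two_le_count_iff (l : List Int) (y : Int) :
    2 ≤ l.count y ↔ ∃ i j : Nat, i ≠ j ∧ l[i]? = some y ∧ l[j]? = some y := by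
  induction l with
  | nil => simp
  | cons a t ih =>
    by_cases ha : a = y
    · subst ha
      rw [List.count_cons_self]
      constructor
      · intro h
        have hmem : a ∈ t := by
          by_contra hc
          rw [List.count_eq_zero_of_not_mem hc] at h
          omega
        obtain ⟨k, hk, hval⟩ := List.getElem_of_mem hmem
        exact ⟨0, k + 1, by omega, by simp,
          by simp [List.getElem?_cons_succ, List.getElem?_eq_getElem hk, hval]⟩
      · rintro ⟨i, j, hij, hi, hj⟩
        match i, j with
        | 0, 0 => omega
        | 0, j + 1 =>
          rw [List.getElem?_cons_succ] at hj
          have : a ∈ t := List.mem_of_getElem? hj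
          have := List.count_pos_iff.mpr this
          omega
        | i + 1, 0 =>
          rw [List.getElem?_cons_succ] at hi
          have : a ∈ t := List.mem_of_getElem? hi
          have := List.count_pos_iff.mpr this
          omega
        | i + 1, j + 1 =>
          rw [List.getElem?_cons_succ] at hi hj
          have := ih.mpr ⟨i, j, by omega, hi, hj⟩
          omega
    · rw [List.count_cons_of_ne (by omega)]
      rw [ih]
      constructor
      · rintro ⟨i, j, hij, hi, hj⟩
        exact ⟨i + 1, j + 1, by omega, by simpa [List.getElem?_cons_succ] using hi,
          by simpa [List.getElem?_cons_succ] using hj⟩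
      · rintro ⟨i, j, hij, hi, hj⟩
        match i, j with
        | 0, _ => simp at hi; exact absurd hi ha
        | _ + 1, 0 => simp at hj; exact absurd hj ha
        | i + 1, j + 1 =>
          rw [List.getElem?_cons_succ] at hi hj
          exact ⟨i, j, by omega, hi, hj⟩

-- goA with nothing to remove is the identity
lemma goA_nil (l : List Int) : goA l [] = l := by
  induction l with
  | nil => rfl
  | cons a t ih => simp [goA, ih]

-- removing r first commutes with the single pass
lemma goA_erase (r : Int) : ∀ (l R : List Int), r ∈ l → r ∉ R →
    goA (l.erase r) R = goA l (r :: R)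
  | [], R, h, _ => absurd h (by simp)
  | a :: t, R, h, hR => by
    by_cases har : a = r
    · subst har
      simp [goA, List.erase_cons_head]
    · rw [List.erase_cons_tail (by simpa using har)]
      have hrt : r ∈ t := by
        rcases List.mem_cons.mp h with h | h
        · exact absurd h.symm har
        · exact h
      simp only [goA]
      by_cases haR : a ∈ R
      · rw [if_pos haR, if_pos (by simp [haR])]
        rw [List.erase_cons_tail (by simpa using fun hc => har hc.symm)]
        exact goA_erase r t (R.erase a) hrt (fun hc => hR (List.mem_of_mem_erase hc))
      · rw [if_neg haR, if_neg (by
          simp only [List.mem_cons]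
          rintro (hc | hc)
          · exact har hc
          · exact haR hc)]
        exact congrArg (a :: ·) (goA_erase r t R hrt hR)

-- folding list.remove over a nodup list of present values = goA
lemma foldl_remove_eq_goA : ∀ (R l : List Int), R.Nodup → (∀ x ∈ R, x ∈ l) →
    R.foldl (fun acc x => (PySem.List.remove? acc x).getD acc) l = goA l R
  | [], l, _, _ => (goA_nil l).symm
  | r :: R', l, hnd, hmem => by
    have hr : r ∈ l := hmem r (by simp)
    have hnd' := List.nodup_cons.mp hnd
    rw [List.foldl_cons, PySem.List.remove?_eq_some_erase l r hr, Option.getD_some]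
    have hmem' : ∀ x ∈ R', x ∈ l.erase r := by
      intro x hx
      have hxr : x ≠ r := by rintro rfl; exact hnd'.1 hx
      exact (List.mem_erase_of_ne hxr).mpr (hmem x (by simp [hx]))
    rw [foldl_remove_eq_goA R' (l.erase r) hnd'.2 hmem']
    exact goA_erase r l R' hr hnd'.1

-- goA over the duplicated-value set = goB
lemma goA_eq_goB : ∀ (suf R pre : List Int), R.Nodup →
    (∀ x, x ∈ R ↔ (x ∉ pre ∧ 2 ≤ suf.count x)) → goA suf R = goB pre suf
  | [], R, pre, _, _ => rfl
  | a :: t, R, pre, hnd, hinv => by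
    have hmem_a : a ∈ R ↔ (a ∉ pre ∧ a ∈ t) := by
      rw [hinv a, List.count_cons_self]
      constructor
      · rintro ⟨h1, h2⟩
        refine ⟨h1, ?_⟩
        by_contra hc
        rw [List.count_eq_zero_of_not_mem hc] at h2
        omega
      · rintro ⟨h1, h2⟩
        exact ⟨h1, by have := List.count_pos_iff.mpr h2; omega⟩
    simp only [goA, goB]
    by_cases haR : a ∈ R
    · have hk := hmem_a.mp haR
      rw [if_pos haR, if_neg (by tauto)]
      refine goA_eq_goB t (R.erase a) (pre ++ [a]) (hnd.erase _) (fun x => ?_)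
      rw [hnd.mem_erase_iff, hinv x]
      by_cases hxa : x = a
      · subst hxa; simp
      · rw [List.count_cons_of_ne (by omega)]
        simp only [List.mem_append, List.mem_singleton, not_or]
        tauto
    · rw [if_neg haR, if_pos (by tauto)]
      refine congrArg (a :: ·) (goA_eq_goB t R (pre ++ [a]) hnd (fun x => ?_))
      rw [hinv x]
      by_cases hxa : x = a
      · subst hxa
        rw [List.count_cons_self]
        simp only [List.mem_append, List.mem_singleton, not_or]
        constructor
        · rintro ⟨h1, h2⟩
          have hxt : x ∈ t := by
            by_contra hc
            rw [List.count_eq_zero_of_not_mem hc] at h2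
            omega
          exact absurd (hmem_a.mpr ⟨h1, hxt⟩) haR
        · rintro ⟨⟨h1, h2⟩, h3⟩
          exact absurd trivial h2
      · rw [List.count_cons_of_ne (by omega)]
        simp only [List.mem_append, List.mem_singleton, not_or]
        tauto

-- j ranges over range(n-1, -1, -1) = the indices 0 … n-1
lemma mem_countdown (n j : Int) : j ∈ PySem.List.pyRange (n - 1) (-1) (-1) ↔ 0 ≤ j ∧ j < n := by
  rw [PySem.List.pyRange_neg_one]
  simp only [List.mem_map, List.mem_range]
  constructor
  · rintro ⟨k, hk, rfl⟩; omega
  · intro h; exact ⟨(n - 1 - j).toNat, by omega, by omega⟩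

-- the removable condition of A's nested loops ↔ y is a duplicated value
lemma exists_idx_iff (l : List Int) (y : Int) :
    (∃ i ∈ PySem.List.pyRange 0 (l.length : Int) 1,
       (∃ j ∈ PySem.List.pyRange ((l.length : Int) - 1) (-1) (-1),
          j ≠ i ∧ PySem.List.pyGetD l i 0 = PySem.List.pyGetD l j 0)
       ∧ PySem.List.pyGetD l i 0 = y)
    ↔ 2 ≤ l.count y := by
  rw [two_le_count_iff]
  constructor
  · rintro ⟨i, hi, ⟨j, hj, hne, heq⟩, hy⟩
    rw [PySem.List.mem_pyRange_one] at hi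
    rw [mem_countdown] at hj
    rw [PySem.List.pyGetD_eq_getElem l 0 hi.1 hi.2] at heq hy
    rw [PySem.List.pyGetD_eq_getElem l 0 hj.1 hj.2] at heq
    refine ⟨i.toNat, j.toNat, by omega, ?_, ?_⟩
    · rw [List.getElem?_eq_getElem (by omega), hy]
    · rw [List.getElem?_eq_getElem (by omega), ← heq, hy]
  · rintro ⟨i, j, hij, hi, hj⟩
    have hi' := List.getElem?_eq_some_iff.mp hi
    have hj' := List.getElem?_eq_some_iff.mp hj
    obtain ⟨hilt, hival⟩ := hi'
    obtain ⟨hjlt, hjval⟩ := hj'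
    refine ⟨(i : Int), PySem.List.mem_pyRange_one.mpr (by omega),
      ⟨(j : Int), (mem_countdown _ _).mpr (by omega), by omega, ?_⟩, ?_⟩
    · rw [PySem.List.pyGetD_eq_getElem l 0 (by omega) (by omega),
        PySem.List.pyGetD_eq_getElem l 0 (by omega) (by omega)]
      simp only [Int.toNat_natCast]
      rw [hival, hjval]
    · rw [PySem.List.pyGetD_eq_getElem l 0 (by omega) (by omega)]
      simpa using hival

-- B's comprehension, generalised over the split of the list
lemma alt_go (l : List Int) : ∀ (suf pre : List Int), l = pre ++ suf →
    (PySem.List.enumerate suf (pre.length : Int)).filterMap (fun p =>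
      if p.2 ∈ PySem.List.slice l none (some p.1)
         ∨ p.2 ∉ PySem.List.slice l (some (p.1 + 1)) none
      then some p.2 else none) = goB pre suf
  | [], pre, h => by simp [PySem.List.enumerate, goB]
  | a :: t, pre, h => by
    rw [PySem.List.enumerate_cons]
    have h1 : PySem.List.slice l none (some (pre.length : Int)) = pre := by
      rw [PySem.List.slice_to_natCast, h, List.take_left]
    have h2 : PySem.List.slice l (some ((pre.length : Int) + 1)) none = t := by
      have hc : ((pre.length : Int) + 1) = ((pre.length + 1 : Nat) : Int) := by push_cast; ring
      have hl : l = (pre ++ [a]) ++ t := by simp [h]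
      rw [hc, PySem.List.slice_from_natCast, hl,
        List.drop_left' (by simp : (pre ++ [a]).length = pre.length + 1)]
    have hrec := alt_go l t (pre ++ [a]) (by simp [h])
    have hlen : ((pre ++ [a]).length : Int) = (pre.length : Int) + 1 := by
      simp
    rw [hlen] at hrec
    by_cases hcond : a ∈ pre ∨ a ∉ t
    · simp only [List.filterMap_cons, h1, h2, goB, if_pos hcond, hrec]
    · simp only [List.filterMap_cons, h1, h2, goB, if_neg hcond, hrec]

-- B's comprehension = goB
lemma alt_eq_goB (l : List Int) : remove_tuplicates_alt l = goB [] l := by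
  have := alt_go l l [] rfl
  simpa [remove_tuplicates_alt] using this

-- ===== VERDICT (by name: the statement is the Claim_ definition above) =====
theorem remove_tuplicates_spec : Claim_equal_remove_tuplicates := by
  intro l _
  show remove_tuplicates l = remove_tuplicates_alt l
  rw [remove_tuplicates]
  rw [PySem.List.foldl_congr_mem _ _
    (fun acc i => if (∃ j ∈ PySem.List.pyRange ((l.length : Int) - 1) (-1) (-1),
        j ≠ i ∧ PySem.List.pyGetD l i 0 = PySem.List.pyGetD l j 0)
        ∧ PySem.List.pyGetD l i 0 ∉ acc
      then acc ++ [PySem.List.pyGetD l i 0] else acc) _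
    (fun acc i _ => inner_loop _ (fun j => j ≠ i)
      (fun j => PySem.List.pyGetD l i 0 = PySem.List.pyGetD l j 0) _ acc)]
  set removable := (PySem.List.pyRange 0 (l.length : Int) 1).foldl
    (fun acc i => if (∃ j ∈ PySem.List.pyRange ((l.length : Int) - 1) (-1) (-1),
        j ≠ i ∧ PySem.List.pyGetD l i 0 = PySem.List.pyGetD l j 0)
        ∧ PySem.List.pyGetD l i 0 ∉ acc
      then acc ++ [PySem.List.pyGetD l i 0] else acc) [] with hrem
  have hchar : ∀ y, y ∈ removable ↔ 2 ≤ l.count y := by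
    intro y
    rw [hrem, mem_foldl_appendIf]
    simp only [List.not_mem_nil, false_or]
    exact exists_idx_iff l y
  have hnd : removable.Nodup := by
    rw [hrem]; exact nodup_foldl_appendIf _ _ _ _ List.nodup_nil
  rw [foldl_remove_eq_goA removable l hnd (fun x hx => by
    have := (hchar x).mp hx
    exact List.count_pos_iff.mp (by omega))]
  rw [goA_eq_goB l removable [] hnd (fun x => by simpa using hchar x)]
  exact (alt_eq_goB l).symm
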